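-- pv_equiv track=rewrite | github.com/analogpixel/AdventOfCode2018 | day2/code.py | calc
-- ===== SOURCE A (Python) =====
-- def calc(l):
-- 	t = {}
--
-- 	for letter in list(l):
-- 		if letter in t:
-- 			t[letter] += 1
-- 		else:
-- 			t[letter] = 1
--
-- 	twoCount = 0
-- 	threeCount = 0
--
-- 	for z in t:
-- 		if t[z] == 2:
-- 			twoCount = 1
-- 		if t[z] == 3:
-- 			threeCount = 1
--
-- 	return (twoCount, threeCount)
-- ===== SOURCE B (Python) =====
-- def calc(l):
--     # sort the letters, then scan runs of equal letters once
--     s = sorted(l)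
--     n = len(s)
--     two = 0
--     three = 0
--     i = 0
--     while i < n:
--         j = i + 1
--         while j < n and s[j] == s[i]:
--             j += 1
--         run = j - i
--         if run == 2:
--             two = 1
--         if run == 3:
--             three = 1
--         i = j
--     return (two, three)
-- ===== Notes on version B (the rewrite author's own statement) =====
-- stated objective: alternative
-- what changed: Replaces the frequency dict plus key scan with sort-then-run-length scan: sort the letters and walk the sorted list once, setting the flags from each run's length.
import Mathlib
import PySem

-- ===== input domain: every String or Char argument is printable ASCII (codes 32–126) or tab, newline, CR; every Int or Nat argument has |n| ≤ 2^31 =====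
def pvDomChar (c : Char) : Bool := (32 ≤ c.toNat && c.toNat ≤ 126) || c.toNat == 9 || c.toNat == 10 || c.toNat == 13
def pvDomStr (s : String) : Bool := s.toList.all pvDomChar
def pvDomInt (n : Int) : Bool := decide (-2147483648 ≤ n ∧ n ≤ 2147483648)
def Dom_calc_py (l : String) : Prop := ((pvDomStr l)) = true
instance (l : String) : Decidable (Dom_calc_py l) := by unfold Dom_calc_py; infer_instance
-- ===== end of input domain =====

-- B replaces A's frequency dict + key scan by sorting the letters and scanning runs of
-- equal letters once (alternative decomposition; not claimed faster).

-- ===== PORT A =====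
def calc_py (l : String) : Int × Int :=
  -- t = {}; for letter in list(l): if letter in t: t[letter] += 1 else: t[letter] = 1
  let t : PySem.Dict Char Int := l.toList.foldl
    (fun d letter =>
      if d.contains letter then d.insert letter (d.getD letter 0 + 1)
      else d.insert letter 1)
    PySem.Dict.empty
  -- twoCount = 0; threeCount = 0; for z in t: if t[z]==2 … ; if t[z]==3 …
  t.keys.foldl
    (fun acc z =>
      (if t.getD z 0 = 2 then 1 else acc.1,
       if t.getD z 0 = 3 then 1 else acc.2))
    (0, 0)

-- ===== PORT B =====
-- the outer while loop of Source B: scan one run of equal letters, set the flags, continue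
def calcRuns : List Char → Int → Int → Int × Int
  | [], two, three => (two, three)
  | c :: rest, two, three =>
    -- inner while loop: j advances over the letters equal to s[i]; run = j - i
    let run : Nat := 1 + (rest.takeWhile (· == c)).length
    calcRuns (rest.dropWhile (· == c))
      (if run = 2 then 1 else two) (if run = 3 then 1 else three)
termination_by s _ _ => s.length
decreasing_by
  simpa using Nat.lt_succ_of_le (List.dropWhile_sublist (l := rest) (· == c)).length_le

def calc_py_alt (l : String) : Int × Int :=
  calcRuns (PySem.List.sorted l.toList (fun x => x) false) 0 0

-- ===== PRECONDITION & SPEC =====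
def Spec_calc_py (l : String) (out : Int × Int) : Prop := out = calc_py_alt l
instance (l : String) (out : Int × Int) : Decidable (Spec_calc_py l out) := by unfold Spec_calc_py; infer_instance

-- ===== CLAIM (what is proved, stated in full; the proofs are below) =====
def Claim_equal_calc_py : Prop := ∀ (l : String), Dom_calc_py l → Spec_calc_py l (calc_py l)

-- ===== LEMMAS AND PROOFS =====

-- the common closed form: flag = 1 iff some letter occurs exactly twice (resp. three times)
def pvFlags (cs : List Char) : Int × Int :=
  (if cs.any (fun z => decide (cs.count z = 2)) then 1 else 0,
   if cs.any (fun z => decide (cs.count z = 3)) then 1 else 0)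

-- A's counting loop builds Counter(l)
theorem pvA_counter (cs : List Char) :
    cs.foldl (fun (d : PySem.Dict Char Int) letter =>
        if d.contains letter then d.insert letter (d.getD letter 0 + 1)
        else d.insert letter 1) PySem.Dict.empty
      = PySem.Dict.counter cs := by
  have hfun : (fun (d : PySem.Dict Char Int) letter =>
      if d.contains letter then d.insert letter (d.getD letter 0 + 1)
      else d.insert letter 1)
      = fun d letter => d.insert letter (d.getD letter 0 + 1) := by
    funext d letter
    by_cases h : d.contains letter = true
    · simp [h]
    · simp only [Bool.not_eq_true] at h
      simp [h, PySem.Dict.getD_of_not_contains d 0 h]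
  rw [hfun, PySem.Dict.foldl_insert_getD_add_one_eq_counter]

-- A's flag loop over any key list
theorem pvA_flagloop (t : PySem.Dict Char Int) (ks : List Char) (a b : Int) :
    ks.foldl (fun acc z =>
        (if t.getD z 0 = 2 then 1 else acc.1,
         if t.getD z 0 = 3 then 1 else acc.2)) (a, b)
      = (if ks.any (fun z => decide (t.getD z 0 = 2)) then 1 else a,
         if ks.any (fun z => decide (t.getD z 0 = 3)) then 1 else b) := by
  induction ks generalizing a b with
  | nil => simp
  | cons k ks ih =>
    rw [List.foldl_cons, ih, List.any_cons, List.any_cons]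
    refine Prod.ext ?_ ?_
    · by_cases h1 : t.getD k 0 = 2 <;>
        by_cases h2 : (ks.any fun z => decide (t.getD z 0 = 2)) = true <;>
          simp [h1, h2]
    · by_cases h1 : t.getD k 0 = 3 <;>
        by_cases h2 : (ks.any fun z => decide (t.getD z 0 = 3)) = true <;>
          simp [h1, h2]

theorem pvA_closed (l : String) : calc_py l = pvFlags l.toList := by
  unfold calc_py pvFlags
  rw [pvA_counter, pvA_flagloop]
  simp only [PySem.Dict.getD_counter, PySem.Dict.keys_counter]
  have hany : ∀ m : Int, ∀ k : Nat, m = (k : Int) →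
      (PySem.Set.ofList l.toList).any (fun z => decide ((l.toList.count z : Int) = m))
        = l.toList.any (fun z => decide (l.toList.count z = k)) := by
    rintro m k rfl
    rw [Bool.eq_iff_iff]
    simp only [List.any_eq_true, decide_eq_true_eq, PySem.Set.mem_ofList]
    constructor
    · rintro ⟨z, hz, h⟩; exact ⟨z, hz, by exact_mod_cast h⟩
    · rintro ⟨z, hz, h⟩; exact ⟨z, hz, by exact_mod_cast h⟩
  rw [hany 2 2 rfl, hany 3 3 rfl]

-- B's run scan on a sorted list computes the flags
theorem pvB_runs : ∀ (n : Nat) (s : List Char), s.length ≤ n → s.Pairwise (· ≤ ·) →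
    ∀ a b : Int, calcRuns s a b
      = (if s.any (fun z => decide (s.count z = 2)) then 1 else a,
         if s.any (fun z => decide (s.count z = 3)) then 1 else b) := by
  intro n
  induction n with
  | zero =>
    intro s hlen _ a b
    have : s = [] := List.eq_nil_of_length_eq_zero (Nat.le_zero.mp hlen)
    subst this; simp [calcRuns]
  | succ n ih =>
    intro s hlen hsort a b
    match s with
    | [] => simp [calcRuns]
    | c :: rest =>
      have hw_all : ∀ x ∈ rest.takeWhile (· == c), x = c := by
        intro x hx
        simpa using List.mem_takeWhile_imp hx
      have hc_le : ∀ x ∈ rest, c ≤ x := (List.pairwise_cons.mp hsort).1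
      have hrest_sorted : rest.Pairwise (· ≤ ·) := (List.pairwise_cons.mp hsort).2
      have hd_sub : (rest.dropWhile (· == c)).Sublist rest := List.dropWhile_sublist _
      have hd_sorted : (rest.dropWhile (· == c)).Pairwise (· ≤ ·) :=
        hrest_sorted.sublist hd_sub
      have hc_not_d : c ∉ rest.dropWhile (· == c) := by
        intro hmem
        cases hd : rest.dropWhile (· == c) with
        | nil => rw [hd] at hmem; exact absurd hmem (List.not_mem_nil)
        | cons h tl =>
          have hne : rest.dropWhile (· == c) ≠ [] := by rw [hd]; exact List.cons_ne_nil h tl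
          have hhead : ((rest.dropWhile (· == c)).head hne == c) = false :=
            List.head_dropWhile_not _ hne
          have hh_ne : h ≠ c := by
            have : (rest.dropWhile (· == c)).head hne = h := by simp [hd]
            rw [this] at hhead; simpa using hhead
          have hh_mem : h ∈ rest := hd_sub.mem (by rw [hd]; exact List.mem_cons_self)
          have hlt : c < h := lt_of_le_of_ne (hc_le _ hh_mem) (Ne.symm hh_ne)
          rw [hd] at hmem
          rcases List.mem_cons.mp hmem with h1 | h2
          · exact hh_ne h1.symm
          · have hp : (h :: tl).Pairwise (· ≤ ·) := by rw [hd] at hd_sorted; exact hd_sorted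
            have : h ≤ c := (List.pairwise_cons.mp hp).1 c h2
            exact absurd (lt_of_lt_of_le hlt this) (lt_irrefl c)
      have hsplit : rest.takeWhile (· == c) ++ rest.dropWhile (· == c) = rest :=
        List.takeWhile_append_dropWhile
      have hw_count : (rest.takeWhile (· == c)).count c = (rest.takeWhile (· == c)).length :=
        List.count_eq_length.mpr (fun b hb => (hw_all b hb).symm)
      have hd_count : (rest.dropWhile (· == c)).count c = 0 :=
        List.count_eq_zero.mpr hc_not_d
      have hrestsplit : rest.count c
          = (rest.takeWhile (· == c)).count c + (rest.dropWhile (· == c)).count c := by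
        conv_lhs => rw [← hsplit]
        rw [List.count_append]
      have hcount_c : (c :: rest).count c = 1 + (rest.takeWhile (· == c)).length := by
        rw [List.count_cons_self, hrestsplit, hw_count, hd_count]
        omega
      have hcount_ne : ∀ x, x ≠ c →
          (c :: rest).count x = (rest.dropWhile (· == c)).count x := by
        intro x hx
        have hw0 : (rest.takeWhile (· == c)).count x = 0 :=
          List.count_eq_zero.mpr (fun hmem => hx (hw_all x hmem))
        have hr : rest.count x
            = (rest.takeWhile (· == c)).count x + (rest.dropWhile (· == c)).count x := by
          conv_lhs => rw [← hsplit]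
          rw [List.count_append]
        have hcx : (c :: rest).count x = rest.count x := by
          simp only [List.count_cons]
          simp
          exact fun h => hx h.symm
        rw [hcx, hr, hw0]
        omega
      have hlen_d : (rest.dropWhile (· == c)).length ≤ n := by
        have := hd_sub.length_le
        simp only [List.length_cons] at hlen
        omega
      rw [calcRuns, ih _ hlen_d hd_sorted]
      -- rewrite the drop's counts to the full list's counts
      have hany_d : ∀ k : Nat,
          (rest.dropWhile (· == c)).any (fun z => decide ((rest.dropWhile (· == c)).count z = k))
            = (rest.dropWhile (· == c)).any (fun z => decide ((c :: rest).count z = k)) := by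
        intro k
        rw [Bool.eq_iff_iff]
        simp only [List.any_eq_true, decide_eq_true_eq]
        constructor
        · rintro ⟨z, hz, hcz⟩
          exact ⟨z, hz, by rw [hcount_ne z (fun h => hc_not_d (h ▸ hz))]; exact hcz⟩
        · rintro ⟨z, hz, hcz⟩
          exact ⟨z, hz, by rw [← hcount_ne z (fun h => hc_not_d (h ▸ hz))]; exact hcz⟩
      -- split the full list's any along head ∣ takeWhile ∣ dropWhile
      have hany_s : ∀ k : Nat,
          (c :: rest).any (fun z => decide ((c :: rest).count z = k))
            = (decide ((c :: rest).count c = k)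
               || (rest.dropWhile (· == c)).any (fun z => decide ((c :: rest).count z = k))) := by
        intro k
        rw [Bool.eq_iff_iff]
        simp only [List.any_eq_true, Bool.or_eq_true, decide_eq_true_eq]
        constructor
        · rintro ⟨z, hz, hcz⟩
          rcases List.mem_cons.mp hz with rfl | hzr
          · exact Or.inl hcz
          · have hz2 : z ∈ rest.takeWhile (· == c) ++ rest.dropWhile (· == c) := by
              rw [hsplit]; exact hzr
            rcases List.mem_append.mp hz2 with hw | hd
            · exact Or.inl ((hw_all z hw) ▸ hcz)
            · exact Or.inr ⟨z, hd, hcz⟩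
        · rintro (h | ⟨z, hz, hcz⟩)
          · exact ⟨c, List.mem_cons_self, h⟩
          · refine ⟨z, List.mem_cons.mpr (Or.inr ?_), hcz⟩
            rw [← hsplit]; exact List.mem_append.mpr (Or.inr hz)
      rw [hany_d 2, hany_d 3, hany_s 2, hany_s 3, hcount_c]
      refine Prod.ext ?_ ?_
      · by_cases h1 : 1 + (rest.takeWhile (· == c)).length = 2 <;>
          by_cases h2 : ((rest.dropWhile (· == c)).any
            fun z => decide ((c :: rest).count z = 2)) = true <;>
              simp [h1, h2]
      · by_cases h1 : 1 + (rest.takeWhile (· == c)).length = 3 <;>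
          by_cases h2 : ((rest.dropWhile (· == c)).any
            fun z => decide ((c :: rest).count z = 3)) = true <;>
              simp [h1, h2]

theorem pvB_closed (l : String) : calc_py_alt l = pvFlags (PySem.List.sorted l.toList (fun x => x) false) := by
  unfold calc_py_alt pvFlags
  exact pvB_runs _ _ (le_refl _) (by simpa using PySem.List.sorted_pairwise l.toList (fun x => x)) 0 0

theorem pvFlags_perm (xs ys : List Char) (h : xs.Perm ys) : pvFlags xs = pvFlags ys := by
  unfold pvFlags
  have hany : ∀ k : Nat,
      xs.any (fun z => decide (xs.count z = k)) = ys.any (fun z => decide (ys.count z = k)) := by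
    intro k
    rw [Bool.eq_iff_iff]
    simp only [List.any_eq_true, decide_eq_true_eq]
    constructor
    · rintro ⟨z, hz, hc⟩
      exact ⟨z, h.mem_iff.mp hz, by rw [← h.count_eq]; exact hc⟩
    · rintro ⟨z, hz, hc⟩
      exact ⟨z, h.mem_iff.mpr hz, by rw [h.count_eq]; exact hc⟩
  rw [hany 2, hany 3]

-- ===== VERDICT (by name: the statement is the Claim_ definition above) =====
theorem calc_py_spec : Claim_equal_calc_py := by
  intro l _
  unfold Spec_calc_py
  rw [pvA_closed, pvB_closed,
    pvFlags_perm _ _ (PySem.List.sorted_perm l.toList (fun x => x) false).symm]
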